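-- pv_equiv track=rewrite | github.com/h66840/graph-toucan | graph-toucan/tool_info/generated_functions_v1/pymcp-permutations.py | pymcp_permutations
-- ===== SOURCE A (Python) =====
-- from typing import Dict, Any, Optional
--
-- def pymcp_permutations(n: int, k: Optional[int] = None) -> Dict[str, Any]:
--     """
--     Calculate the number of permutations P(n,k) = n! / (n-k)! for given n and k.
--
--     This function computes the number of ways to choose k items from n items
--     without repetition and with order (i.e., permutations).
--
--     If k is not provided, it defaults to n (i.e., P(n,n) = n!).
--
--     Args:
--         n (int): The number of items to choose from (required).
--         k (Optional[int]): The number of items to choose (optional, defaults to n).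
--
--     Returns:
--         Dict[str, Any]: A dictionary containing the result field with the number of permutations.
--                        - result (int): The number of permutations P(n,k).
--
--     Raises:
--         ValueError: If n is negative, or if k is negative, or if k > n.
--         TypeError: If n or k are not integers.
--     """
--     # Input validation
--     if not isinstance(n, int):
--         raise TypeError("n must be an integer")
--
--     if n < 0:
--         raise ValueError("n must be non-negative")
--
--     # Set default value for k
--     if k is None:
--         k = n
--     else:
--         if not isinstance(k, int):
--             raise TypeError("k must be an integer")
--         if k < 0:
--             raise ValueError("k must be non-negative")
--         if k > n:
--             raise ValueError("k cannot be greater than n")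
--
--     # Calculate permutations: P(n,k) = n! / (n-k)!
--     # Optimized calculation to avoid large factorials
--     result = 1
--     for i in range(n, n - k, -1):
--         result *= i
--
--     return {"result": result}
-- ===== SOURCE B (Python) =====
-- from typing import Dict, Any, Optional
--
-- def _range_prod(lo: int, hi: int) -> int:
--     """Product of the integers lo..hi inclusive, by balanced divide and conquer."""
--     if hi < lo:
--         return 1
--     if lo == hi:
--         return lo
--     mid = (lo + hi) // 2
--     return _range_prod(lo, mid) * _range_prod(mid + 1, hi)
--
-- def pymcp_permutations(n: int, k: Optional[int] = None) -> Dict[str, Any]: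
--     """P(n,k) = product of the k integers in (n-k, n], via binary splitting."""
--     if not isinstance(n, int):
--         raise TypeError("n must be an integer")
--     if n < 0:
--         raise ValueError("n must be non-negative")
--     if k is None:
--         k = n
--     else:
--         if not isinstance(k, int):
--             raise TypeError("k must be an integer")
--         if k < 0:
--             raise ValueError("k must be non-negative")
--         if k > n:
--             raise ValueError("k cannot be greater than n")
--     return {"result": _range_prod(n - k + 1, n)}
-- ===== Notes on version B (the rewrite author's own statement) =====
-- stated objective: alternative
-- what changed: Replaces A's single left-to-right descending accumulator loop with a recursive balanced divide-and-conquer product of the ascending range (n-k, n], multiplying two half-products at each level.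
import Mathlib
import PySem

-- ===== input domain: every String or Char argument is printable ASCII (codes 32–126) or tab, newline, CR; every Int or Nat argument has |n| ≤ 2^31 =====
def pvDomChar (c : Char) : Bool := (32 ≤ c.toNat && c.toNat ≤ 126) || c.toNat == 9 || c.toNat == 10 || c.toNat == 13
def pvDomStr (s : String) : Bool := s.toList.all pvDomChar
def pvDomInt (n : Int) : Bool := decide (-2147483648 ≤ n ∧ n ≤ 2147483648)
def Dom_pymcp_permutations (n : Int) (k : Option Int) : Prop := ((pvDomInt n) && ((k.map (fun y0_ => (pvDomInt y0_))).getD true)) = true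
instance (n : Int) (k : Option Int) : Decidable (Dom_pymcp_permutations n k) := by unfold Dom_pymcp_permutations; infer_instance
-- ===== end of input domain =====

-- B computes the k-term product over (n-k, n] by a recursive balanced divide-and-conquer
-- split instead of A's single descending accumulator loop; alternative decomposition, same result.

-- ===== PORT A =====
def pymcp_permutations (n : Int) (k : Option Int) : List (String × Int) :=
  let kk := k.getD n
  let result := (PySem.List.pyRange n (n - kk) (-1)).foldl (fun acc i => acc * i) 1
  [("result", result)]

-- ===== PORT B =====
-- port of Source B's _range_prod: product of lo..hi inclusive by balanced halving
def pvRangeProd (lo hi : Int) : Int :=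
  if hi < lo then 1
  else if lo = hi then lo
  else
    let mid := PySem.Int.floordiv (lo + hi) 2
    pvRangeProd lo mid * pvRangeProd (mid + 1) hi
termination_by (hi - lo).toNat
decreasing_by
  · have hb := PySem.Int.floordiv_two_mid_bounds (by omega : lo ≤ hi)
    have hlt : PySem.Int.floordiv (lo + hi) 2 < hi := by
      rw [PySem.Int.floordiv_lt_iff_lt_mul (by omega)]; omega
    omega
  · have hb := PySem.Int.floordiv_two_mid_bounds (by omega : lo ≤ hi)
    omega

def pymcp_permutations_alt (n : Int) (k : Option Int) : List (String × Int) :=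
  let kk := k.getD n
  [("result", pvRangeProd (n - kk + 1) n)]

-- ===== PRECONDITION & SPEC =====
-- Pre_ excludes exactly the inputs on which A raises ValueError: n < 0, k < 0, or k > n.
def Pre_pymcp_permutations (n : Int) (k : Option Int) : Prop :=
  0 ≤ n ∧ 0 ≤ k.getD n ∧ k.getD n ≤ n
instance (n : Int) (k : Option Int) : Decidable (Pre_pymcp_permutations n k) := by
  unfold Pre_pymcp_permutations; infer_instance
def pvWitness_pymcp_permutations : Int × Option Int := (5, some 2)

def Spec_pymcp_permutations (n : Int) (k : Option Int) (out : List (String × Int)) : Prop := out = pymcp_permutations_alt n k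
instance (n : Int) (k : Option Int) (out : List (String × Int)) : Decidable (Spec_pymcp_permutations n k out) := by unfold Spec_pymcp_permutations; infer_instance

-- ===== CLAIM (what is proved, stated in full; the proofs are below) =====
def Claim_equal_pymcp_permutations : Prop := ∀ (n : Int) (k : Option Int), Dom_pymcp_permutations n k → Pre_pymcp_permutations n k → Spec_pymcp_permutations n k (pymcp_permutations n k)

-- ===== LEMMAS AND PROOFS =====

theorem pv_foldl_mul_prod (xs : List Int) :
    xs.foldl (fun acc i => acc * i) 1 = xs.prod := by
  rw [List.prod_eq_foldl]

theorem pvRangeProd_eq (lo hi : Int) :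
    pvRangeProd lo hi = (PySem.List.pyRange lo (hi + 1) 1).prod := by
  induction lo, hi using pvRangeProd.induct with
  | case1 lo hi h =>
    rw [pvRangeProd, if_pos h, PySem.List.pyRange_one_eq_nil (by omega)]
    simp
  | case2 hi h1 =>
    rw [pvRangeProd, if_neg h1, if_pos rfl, PySem.List.pyRange_one_cons (by omega),
      PySem.List.pyRange_one_eq_nil (by omega)]
    simp
  | case3 lo hi h1 h2 mid ih1 ih2 =>
    have hmid : mid = PySem.Int.floordiv (lo + hi) 2 := rfl
    rw [hmid] at ih1 ih2
    have hb := PySem.Int.floordiv_two_mid_bounds (by omega : lo ≤ hi)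
    have hlt : PySem.Int.floordiv (lo + hi) 2 < hi := by
      rw [PySem.Int.floordiv_lt_iff_lt_mul (by omega)]; omega
    rw [pvRangeProd, if_neg h1, if_neg h2]
    simp only []
    rw [ih1, ih2,
      PySem.List.pyRange_one_append lo (PySem.Int.floordiv (lo + hi) 2 + 1) (hi + 1)
        (by omega) (by omega),
      List.prod_append]

-- ===== VERDICT (by name: the statement is the Claim_ definition above) =====
theorem pymcp_permutations_spec : Claim_equal_pymcp_permutations := by
  intro n k _ hpre
  obtain ⟨hn, hk0, hkn⟩ := hpre
  unfold Spec_pymcp_permutations pymcp_permutations pymcp_permutations_alt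
  simp only []
  rw [pv_foldl_mul_prod, pvRangeProd_eq, PySem.List.pyRange_neg_one_eq_reverse,
    List.prod_reverse, show n - k.getD n + 1 = (n - k.getD n) + 1 from rfl]
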